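-- pv_equiv track=rewrite | github.com/Princic-1837592/Hooty | functions.py | convert_to_single_lines
-- ===== SOURCE A (Python) =====
-- def convert_to_single_lines(lines):
--     buffer = []
--     result = [lines[0]]
--     lines.append(">")
--     for l in lines[1:]:
--         if l[0] == ">":
--             result.append("".join(buffer))
--             result.append(l)
--             buffer.clear()
--         else:
--             buffer.append(l)
--     return result
-- ===== SOURCE B (Python) =====
-- def convert_to_single_lines(lines):
--     result = [lines[0]]
--     lines.append(">")
--     headers = [i for i, l in enumerate(lines) if i > 0 and l[0] == ">"]
--     prev = 1
--     for i in headers: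
--         result.append("".join(lines[prev:i]))
--         result.append(lines[i])
--         prev = i + 1
--     return result
-- ===== Notes on version B (the rewrite author's own statement) =====
-- stated objective: alternative
-- what changed: Replaces the single accumulating-buffer pass with a two-pass index-then-slice structure: first collect the positions of all header lines, then emit each sequence block by joining a slice between consecutive header indices.
import Mathlib
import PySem

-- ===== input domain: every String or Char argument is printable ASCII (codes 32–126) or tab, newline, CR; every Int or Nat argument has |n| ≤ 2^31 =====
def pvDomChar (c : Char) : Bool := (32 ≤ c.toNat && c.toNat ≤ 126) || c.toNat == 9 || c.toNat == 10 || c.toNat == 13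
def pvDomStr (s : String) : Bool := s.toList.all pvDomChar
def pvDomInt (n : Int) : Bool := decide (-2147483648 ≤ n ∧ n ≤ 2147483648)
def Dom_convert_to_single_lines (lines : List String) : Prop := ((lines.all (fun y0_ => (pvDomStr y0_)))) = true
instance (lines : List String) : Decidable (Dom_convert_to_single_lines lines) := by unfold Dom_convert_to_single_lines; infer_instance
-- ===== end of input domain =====

-- B replaces A's single accumulating-buffer pass with a two-pass header-index-then-slice
-- decomposition (same cost); both Pythons append a ">" sentinel to `lines` in place — the
-- mutation is identical, and the equivalence proved here is about the return value.

-- ===== PORT A =====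
-- A: one pass over lines[1:] ++ [">"] carrying (buffer, result).
def convert_to_single_lines (lines : List String) : List String :=
  match lines with
  | [] => []  -- Python raises IndexError on lines[0]; outside Pre_
  | l0 :: rest =>
    let st := (rest ++ [">"]).foldl
      (fun (st : List String × List String) l =>
        if PySem.Str.pyGet? l 0 = some '>' then
          (([] : List String), st.2 ++ [PySem.Str.join "" st.1, l])
        else (st.1 ++ [l], st.2))
      (([] : List String), [l0])
    st.2

-- ===== PORT B =====
-- B: collect header indices of lines ++ [">"], then emit join-of-slice between them.
def convert_to_single_lines_alt (lines : List String) : List String :=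
  match lines with
  | [] => []  -- Python raises IndexError on lines[0]; outside Pre_
  | l0 :: _ =>
    let lines' := lines ++ [">"]
    let headers : List Int := (PySem.List.enumerate lines' 0).filterMap
      (fun p => if p.1 > 0 ∧ PySem.Str.pyGet? p.2 0 = some '>' then some p.1 else none)
    let st := headers.foldl
      (fun (st : List String × Int) i =>
        (st.1 ++ [PySem.Str.join "" (PySem.List.slice lines' (some st.2) (some i)),
                  PySem.List.pyGetD lines' i ""], i + 1))
      ([l0], (1 : Int))
    st.1

-- ===== PRECONDITION & SPEC =====
-- Pre_ is exactly where the Python A returns: it raises IndexError on the empty list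
-- (lines[0]) and on any empty string after the first line (l[0]).
def Pre_convert_to_single_lines (lines : List String) : Prop :=
  lines ≠ [] ∧ ∀ l ∈ lines.tail, l ≠ ""
instance (lines : List String) : Decidable (Pre_convert_to_single_lines lines) := by
  unfold Pre_convert_to_single_lines; infer_instance
def pvWitness_convert_to_single_lines : List String := [">seq1", "AC", "GT", ">seq2", "TT"]

def Spec_convert_to_single_lines (lines : List String) (out : List String) : Prop := out = convert_to_single_lines_alt lines
instance (lines : List String) (out : List String) : Decidable (Spec_convert_to_single_lines lines out) := by unfold Spec_convert_to_single_lines; infer_instance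

-- ===== CLAIM (what is proved, stated in full; the proofs are below) =====
def Claim_equal_convert_to_single_lines : Prop := ∀ (lines : List String), Dom_convert_to_single_lines lines → Pre_convert_to_single_lines lines → Spec_convert_to_single_lines lines (convert_to_single_lines lines)

-- ===== LEMMAS AND PROOFS =====

-- common recursive characterisation of the merged output (proof-only helper)
def pvMerge (buf : List String) : List String → List String
  | [] => []
  | l :: ls =>
    if PySem.List.pyGet? l.toList 0 = some '>' then
      PySem.Str.join "" buf :: l :: pvMerge [] ls
    else pvMerge (buf ++ [l]) ls

-- A's fold computes pvMerge
theorem pvA_fold (L : List String) : ∀ (buf res : List String),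
    (L.foldl
      (fun (st : List String × List String) l =>
        if PySem.Str.pyGet? l 0 = some '>' then
          (([] : List String), st.2 ++ [PySem.Str.join "" st.1, l])
        else (st.1 ++ [l], st.2)) (buf, res)).2 = res ++ pvMerge buf L := by
  induction L with
  | nil => intro buf res; simp [pvMerge]
  | cons l ls ih =>
    intro buf res
    simp only [PySem.Str.pyGet?, PySem.Chars.pyGet?] at ih
    by_cases h : PySem.List.pyGet? l.toList 0 = some '>' <;>
      simp [List.foldl, pvMerge, h, PySem.Str.pyGet?, PySem.Chars.pyGet?, ih]

-- structural form of B's header-index list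
def pvHdrs (s : Int) : List String → List Int
  | [] => []
  | l :: ls =>
    (if 0 < s ∧ PySem.List.pyGet? l.toList 0 = some '>' then [s] else []) ++ pvHdrs (s + 1) ls

theorem pvHdrs_eq (xs : List String) : ∀ (s : Int),
    (PySem.List.enumerate xs s).filterMap
      (fun p => if p.1 > 0 ∧ PySem.Str.pyGet? p.2 0 = some '>' then some p.1 else none)
      = pvHdrs s xs := by
  induction xs with
  | nil => intro s; simp [pvHdrs, PySem.List.enumerate_nil]
  | cons x xs ih =>
    intro s
    simp only [PySem.Str.pyGet?, PySem.Chars.pyGet?, gt_iff_lt] at ih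
    by_cases h : 0 < s ∧ PySem.List.pyGet? x.toList 0 = some '>' <;>
      simp [PySem.List.enumerate_cons, h, pvHdrs, PySem.Str.pyGet?, PySem.Chars.pyGet?, ih]

-- B's fold over the header indices of lines' from position p, with slice origin q
theorem pvB_fold (lines' : List String) (xs : List String) : ∀ (p q : Nat) (res : List String),
    1 ≤ q → q ≤ p → lines'.drop p = xs →
    ((pvHdrs (p : Int) xs).foldl
      (fun (st : List String × Int) i =>
        (st.1 ++ [PySem.Str.join "" (PySem.List.slice lines' (some st.2) (some i)),
                  PySem.List.pyGetD lines' i ""], i + 1))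
      (res, (q : Int))).1
    = res ++ pvMerge ((lines'.drop q).take (p - q)) xs := by
  induction xs with
  | nil => intro p q res _ _ _; simp [pvHdrs, pvMerge]
  | cons x xs ih =>
    intro p q res hq hqp hdrop
    have hget : lines'[p]? = some x := by
      have h0 : (lines'.drop p)[0]? = some x := by rw [hdrop]; rfl
      rwa [List.getElem?_drop, Nat.add_zero] at h0
    have hdrop' : lines'.drop (p + 1) = xs := by
      have h1 : (lines'.drop p).drop 1 = xs := by rw [hdrop]; rfl
      rwa [List.drop_drop] at h1
    have hcast : ((p : Int) + 1) = ((p + 1 : Nat) : Int) := by push_cast; ring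
    have hgetD : PySem.List.pyGetD lines' (p : Int) "" = x := by
      simp [PySem.List.pyGetD_natCast, List.getD, hget]
    have hslice : PySem.List.slice lines' (some (q : Int)) (some (p : Int))
        = (lines'.drop q).take (p - q) := PySem.List.slice_natCast lines' q p
    by_cases h : PySem.List.pyGet? x.toList 0 = some '>'
    · have hcond : (0 : Int) < (p : Nat) ∧ PySem.List.pyGet? x.toList 0 = some '>' :=
        ⟨by exact_mod_cast (show 0 < p by omega), h⟩
      have hhd : pvHdrs (p : Int) (x :: xs) = (p : Int) :: pvHdrs ((p : Int) + 1) xs := by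
        simp only [pvHdrs]; rw [if_pos hcond]; rfl
      rw [hhd, List.foldl_cons, hcast]
      rw [ih (p + 1) (p + 1) _ (by omega) le_rfl hdrop']
      simp [pvMerge, h, hslice, hgetD]
    · have hcond : ¬ ((0 : Int) < (p : Nat) ∧ PySem.List.pyGet? x.toList 0 = some '>') := by
        intro hc; exact h hc.2
      have hhd : pvHdrs (p : Int) (x :: xs) = pvHdrs ((p : Int) + 1) xs := by
        simp only [pvHdrs]; rw [if_neg hcond]; rfl
      have hbuf : (lines'.drop q).take (p + 1 - q) = (lines'.drop q).take (p - q) ++ [x] := by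
        have h1 : p + 1 - q = (p - q) + 1 := by omega
        have h2 : (lines'.drop q)[p - q]? = some x := by
          rw [List.getElem?_drop, show q + (p - q) = p by omega]; exact hget
        rw [h1, List.take_add_one, h2]; rfl
      rw [hhd, hcast]
      rw [ih (p + 1) q res hq (by omega) hdrop', hbuf]
      simp [pvMerge, h]

-- ===== VERDICT (by name: the statement is the Claim_ definition above) =====
theorem convert_to_single_lines_spec : Claim_equal_convert_to_single_lines := by
  intro lines _ _
  unfold Spec_convert_to_single_lines convert_to_single_lines convert_to_single_lines_alt
  match lines with
  | [] => rfl
  | l0 :: rest =>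
    simp only
    rw [pvA_fold, pvHdrs_eq]
    have hh : pvHdrs (0 : Int) ((l0 :: rest) ++ [">"])
        = pvHdrs (1 : Int) (rest ++ [">"]) := by
      simp [pvHdrs]
    rw [hh]
    have hb := pvB_fold ((l0 :: rest) ++ [">"]) (rest ++ [">"]) 1 1 [l0]
      (by omega) (by omega) (by simp)
    simp only [Nat.cast_one] at hb
    rw [hb]
    simp
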